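-- pv_equiv track=rewrite | github.com/yuuforest/Personal-Project | PCCP 모의고사/신입사원 교육.py | solution
-- ===== SOURCE A (Python) =====
-- import heapq
--
-- def solution(ability, number):
--
--     q = []
--     for a in ability:
--         heapq.heappush(q, a)
--
--     for _ in range(number):
--
--         total = 0
--         for _ in range(2):
--             total += heapq.heappop(q)
--
--         heapq.heappush(q, total)
--         heapq.heappush(q, total)
--
--     return sum(q)
-- ===== SOURCE B (Python) =====
-- from collections import deque
--
-- def solution(ability, number):
--     # Huffman-style two-queue linear merge: sorted originals are consumed as a
--     # FIFO queue and every produced total is appended (twice) to a second FIFO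
--     # queue, which a provable monotonicity invariant keeps sorted; each round is
--     # O(1) -- no heap and no ordered re-insertion anywhere.
--     orig = deque(sorted(ability))
--     sums = deque()
--     for _ in range(number):
--         total = 0
--         for _ in range(2):
--             if sums and (not orig or sums[0] <= orig[0]):
--                 total += sums.popleft()
--             else:
--                 total += orig.popleft()
--         sums.append(total)
--         sums.append(total)
--     return sum(orig) + sum(sums)
-- ===== Notes on version B (the rewrite author's own statement) =====
-- stated objective: faster
-- what changed: Replaces the heap simulation by the Huffman two-queue linear merge: the abilities are sorted once into a FIFO queue, produced totals go (twice each) into a second FIFO queue that a monotonicity invariant keeps sorted, and each round pops from the cheaper queue front in O(1) instead of doing heap sift operations.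
import Mathlib
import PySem

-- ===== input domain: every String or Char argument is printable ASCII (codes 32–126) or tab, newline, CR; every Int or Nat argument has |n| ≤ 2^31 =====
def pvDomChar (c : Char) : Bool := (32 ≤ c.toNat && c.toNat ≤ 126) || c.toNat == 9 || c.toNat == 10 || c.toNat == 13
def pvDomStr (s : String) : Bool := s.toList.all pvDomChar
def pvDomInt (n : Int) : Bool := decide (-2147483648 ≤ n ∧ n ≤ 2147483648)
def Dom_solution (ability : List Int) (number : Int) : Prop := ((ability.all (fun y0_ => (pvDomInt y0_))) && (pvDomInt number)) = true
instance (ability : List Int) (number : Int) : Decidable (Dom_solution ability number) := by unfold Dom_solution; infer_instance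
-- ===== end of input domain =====

-- B replaces A's binary heap by the Huffman two-queue linear merge (sorted originals queue +
-- FIFO queue of produced totals, O(1) per round); return values proved equal on Pre_.

-- ===== PORT A =====
-- heapq._siftdown(heap, 0, pos): the new item is conceptually at index pos (startpos is 0 at both call sites)

def pvSiftdown (heap : List Int) (pos : Nat) (item : Int) : List Int :=
  if hpos0 : 0 < pos then
    if item < heap.getD ((pos - 1) / 2) 0 then
      pvSiftdown (heap.set pos (heap.getD ((pos - 1) / 2) 0)) ((pos - 1) / 2) item
    else heap.set pos item
  else heap.set pos item
termination_by pos
decreasing_by exact Nat.lt_of_le_of_lt (Nat.div_le_self _ _) (by omega)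

-- heapq._siftup(heap, pos) with newitem = heap[pos]; the two outcomes of Python's childpos choice written as the two branches
def pvSiftup (heap : List Int) (pos : Nat) (item : Int) : List Int :=
  if hchild : 2 * pos + 1 < heap.length then
    if 2 * pos + 2 < heap.length ∧ ¬ (heap.getD (2 * pos + 1) 0 < heap.getD (2 * pos + 2) 0) then
      pvSiftup (heap.set pos (heap.getD (2 * pos + 2) 0)) (2 * pos + 2) item
    else
      pvSiftup (heap.set pos (heap.getD (2 * pos + 1) 0)) (2 * pos + 1) item
  else pvSiftdown heap pos item
termination_by heap.length - pos
decreasing_by all_goals simp only [List.length_set]; omega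

def pvHeappush (q : List Int) (a : Int) : List Int := pvSiftdown (q ++ [a]) q.length a

-- heapq.heappop; on [] Python raises IndexError (excluded by Pre_solution), here (0, [])
def pvHeappop (q : List Int) : Int × List Int :=
  match q with
  | [] => (0, [])
  | x :: xs =>
    let lastelt := (x :: xs).getLast (by simp)
    match (x :: xs).dropLast with
    | [] => (lastelt, [])
    | r0 :: rs => (r0, pvSiftup (lastelt :: rs) 0 lastelt)

def solution (ability : List Int) (number : Int) : Int :=
  ((PySem.List.pyRange 0 number 1).foldl (fun q _ =>
      let p1 := pvHeappop q
      let p2 := pvHeappop p1.2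
      let total := 0 + p1.1 + p2.1
      pvHeappush (pvHeappush p2.2 total) total)
    (ability.foldl (fun q a => pvHeappush q a) [])).sum

-- ===== PORT B =====
-- one 'total += popleft-from-the-cheaper-queue-front' step of Source B's inner loop:
-- returns the popped value and the two remaining queues; on two empty queues
-- Python raises IndexError (excluded by Pre_solution), here (0, [], [])
def pvPopMin (orig sums : List Int) : Int × List Int × List Int :=
  match sums, orig with
  | s :: ss, [] => (s, ([], ss))
  | s :: ss, o :: os => if s ≤ o then (s, (o :: os, ss)) else (o, (os, s :: ss))
  | [], [] => (0, ([], []))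
  | [], o :: os => (o, (os, []))

def solution_alt (ability : List Int) (number : Int) : Int :=
  let st := (PySem.List.pyRange 0 number 1).foldl (fun os _ =>
      let p1 := pvPopMin os.1 os.2
      let p2 := pvPopMin p1.2.1 p1.2.2
      let total := 0 + p1.1 + p2.1
      (p2.2.1, p2.2.2 ++ [total, total]))
    (PySem.List.sorted ability (fun x => x) false, ([] : List Int))
  st.1.sum + st.2.sum

-- ===== PRECONDITION & SPEC =====
-- Pre_ excludes exactly the inputs where Python A raises IndexError (a merge round requested with fewer than two values in the heap; Python B raises there too).
def Pre_solution (ability : List Int) (number : Int) : Prop := 1 ≤ number → 2 ≤ ability.length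
instance (ability : List Int) (number : Int) : Decidable (Pre_solution ability number) := by unfold Pre_solution; infer_instance
def pvWitness_solution : List Int × Int := ([3, 1, 4, 2], 2)
def Spec_solution (ability : List Int) (number : Int) (out : Int) : Prop := out = solution_alt ability number
instance (ability : List Int) (number : Int) (out : Int) : Decidable (Spec_solution ability number out) := by unfold Spec_solution; infer_instance

-- ===== CLAIM (what is proved, stated in full; the proofs are below) =====
def Claim_equal_solution : Prop := ∀ (ability : List Int) (number : Int), Dom_solution ability number → Pre_solution ability number → Spec_solution ability number (solution ability number)

-- ===== LEMMAS AND PROOFS =====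

theorem getD_set_eq (l : List Int) (n : Nat) (a : Int) (h : n < l.length) : (l.set n a).getD n 0 = a := by
  simp [List.getD_eq_getElem?_getD, h]

theorem getD_set_ne (l : List Int) (n m : Nat) (a : Int) (h : m ≠ n) : (l.set n a).getD m 0 = l.getD m 0 := by
  simp [List.getD_eq_getElem?_getD, Ne.symm h]

theorem set_swap_perm (l : List Int) (i j : Nat) (hi : i < l.length) (hj : j < l.length) :
    ((l.set i (l.getD j 0)).set j (l.getD i 0)).Perm l := by
  rw [List.getD_eq_getElem l 0 hj, List.getD_eq_getElem l 0 hi]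
  have hi' : i < l.toArray.size := by simpa using hi
  have hj' : j < l.toArray.size := by simpa using hj
  have h := Array.swap_perm (xs := l.toArray) hi' hj'
  have e : (l.toArray.swap i j hi' hj').toList = (l.set i l[j]).set j l[i] := by
    simp [Array.swap]
  rw [Array.perm_iff_toList_perm, e] at h
  simpa using h

def IsHeap (q : List Int) : Prop :=
  ∀ i j : Nat, j < q.length → (j = 2 * i + 1 ∨ j = 2 * i + 2) → q.getD i 0 ≤ q.getD j 0

theorem siftdown_spec (heap : List Int) (pos : Nat) (item : Int) (hp : pos < heap.length)
    (h1 : ∀ i j, j < heap.length → (j = 2 * i + 1 ∨ j = 2 * i + 2) → j ≠ pos →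
      (heap.set pos item).getD i 0 ≤ (heap.set pos item).getD j 0)
    (h2 : ∀ j, j < heap.length → (j = 2 * pos + 1 ∨ j = 2 * pos + 2) → 0 < pos →
      (heap.set pos item).getD ((pos - 1) / 2) 0 ≤ (heap.set pos item).getD j 0) :
    IsHeap (pvSiftdown heap pos item) ∧ (pvSiftdown heap pos item).Perm (heap.set pos item) := by
  fun_induction pvSiftdown heap pos item with
  | case1 heap pos hpos hlt ih =>
    -- recursive: move parent value down, recurse at parent
    set par := (pos - 1) / 2 with hpar
    set pv := heap.getD par 0 with hpv
    have hparlt : par < pos := Nat.lt_of_le_of_lt (Nat.div_le_self _ _) (by omega)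
    have hparne : par ≠ pos := Nat.ne_of_lt hparlt
    have hplen : par < heap.length := lt_trans hparlt hp
    -- A = heap.set pos item ; A' = (heap.set pos pv).set par item
    set A := heap.set pos item with hA
    have hApos : A.getD pos 0 = item := getD_set_eq _ _ _ hp
    have hApar : A.getD par 0 = pv := by rw [hA, getD_set_ne _ _ _ _ hparne, hpv]
    have hAk : ∀ k, k ≠ pos → A.getD k 0 = heap.getD k 0 := fun k hk => getD_set_ne _ _ _ _ hk
    have hswap : (heap.set pos pv).set par item = (A.set pos pv).set par item := by
      rw [hA, List.set_set]
    have hAlen : A.length = heap.length := by simp [hA]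
    have hlen' : (heap.set pos pv).length = heap.length := by simp
    -- characterize A' pointwise
    set A' := (heap.set pos pv).set par item with hA'
    have hA'par : A'.getD par 0 = item := getD_set_eq _ _ _ (by simpa using hplen)
    have hA'pos : A'.getD pos 0 = pv := by
      rw [hA', getD_set_ne _ _ _ _ (Ne.symm hparne), getD_set_eq _ _ _ hp]
    have hA'k : ∀ k, k ≠ pos → k ≠ par → A'.getD k 0 = A.getD k 0 := by
      intro k hk1 hk2
      rw [hA', getD_set_ne _ _ _ _ hk2, getD_set_ne _ _ _ _ hk1, hA, getD_set_ne _ _ _ _ hk1]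
    obtain ⟨ihH, ihP⟩ := ih (by simpa using hplen)
      (by
        intro i j hj hc hne
        simp only [List.length_set] at hj
        rcases eq_or_ne j pos with rfl | hjpos
        · have hi : i = par := by omega
          subst hi
          rw [hA'par, hA'pos]
          exact le_of_lt hlt
        · rw [hA'k j hjpos hne]
          rcases eq_or_ne i par with rfl | hipar
          · rw [hA'par]
            exact le_trans (le_of_lt (by rw [hApar]; exact hlt)) (h1 par j hj hc hjpos)
          · rcases eq_or_ne i pos with rfl | hipos
            · rw [hA'pos, ← hApar]
              exact h2 j hj hc hpos
            · rw [hA'k i hipos hipar]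
              exact h1 i j hj hc hjpos)
      (by
        intro j hj hc hpar0
        simp only [List.length_set] at hj
        have hgp : (par - 1) / 2 ≠ pos := by omega
        have hgppar : (par - 1) / 2 ≠ par := by omega
        have hchild : par = 2 * ((par - 1) / 2) + 1 ∨ par = 2 * ((par - 1) / 2) + 2 := by omega
        rw [hA'k _ hgp hgppar]
        have hbase : A.getD ((par - 1) / 2) 0 ≤ A.getD par 0 :=
          h1 _ par hplen hchild hparne
        rcases eq_or_ne j pos with rfl | hjpos
        · rw [hA'pos, ← hApar]
          exact hbase
        · have hjpar : j ≠ par := by omega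
          rw [hA'k j hjpos hjpar]
          exact le_trans hbase (h1 par j hj hc hjpos))
    refine ⟨ihH, ?_⟩
    refine ihP.trans ?_
    -- (heap.set pos pv).set par item = A' ~ A
    have e : (A.set pos (A.getD par 0)).set par (A.getD pos 0) = A' := by
      rw [hApos, hApar, hA', hA, List.set_set]
    rw [← e]
    exact set_swap_perm A pos par (by omega) (by omega)
  | case2 heap pos hpos hge =>
    refine ⟨?_, List.Perm.refl _⟩
    intro i j hj hc
    simp only [List.length_set] at hj
    rcases eq_or_ne j pos with heq | hne
    · -- i is the parent of pos
      have hi : i = (pos - 1) / 2 := by omega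
      rw [heq, hi, getD_set_ne heap pos ((pos - 1) / 2) item (by omega),
        getD_set_eq _ _ _ hp]
      omega
    · exact h1 i j hj hc hne
  | case3 heap pos hpos =>
    have hpos0 : pos = 0 := by omega
    subst hpos0
    refine ⟨?_, List.Perm.refl _⟩
    intro i j hj hc
    simp only [List.length_set] at hj
    exact h1 i j hj hc (by rcases hc with h | h <;> omega)

theorem siftup_rec (heap : List Int) (pos c : Nat) (item : Int)
    (hp : pos < heap.length) (hclt : c < heap.length) (hcc : c = 2 * pos + 1 ∨ c = 2 * pos + 2)
    (hmin : ∀ s, s < heap.length → (s = 2 * pos + 1 ∨ s = 2 * pos + 2) →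
      (heap.set pos item).getD c 0 ≤ (heap.set pos item).getD s 0)
    (h1 : ∀ i j, j < heap.length → (j = 2 * i + 1 ∨ j = 2 * i + 2) → i ≠ pos → j ≠ pos →
      (heap.set pos item).getD i 0 ≤ (heap.set pos item).getD j 0)
    (h2 : ∀ j, j < heap.length → (j = 2 * pos + 1 ∨ j = 2 * pos + 2) → 0 < pos →
      (heap.set pos item).getD ((pos - 1) / 2) 0 ≤ (heap.set pos item).getD j 0) :
    c < (heap.set pos (heap.getD c 0)).length ∧
    (∀ i j, j < (heap.set pos (heap.getD c 0)).length → (j = 2 * i + 1 ∨ j = 2 * i + 2) →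
      i ≠ c → j ≠ c →
      ((heap.set pos (heap.getD c 0)).set c item).getD i 0 ≤ ((heap.set pos (heap.getD c 0)).set c item).getD j 0) ∧
    (∀ j, j < (heap.set pos (heap.getD c 0)).length → (j = 2 * c + 1 ∨ j = 2 * c + 2) → 0 < c →
      ((heap.set pos (heap.getD c 0)).set c item).getD ((c - 1) / 2) 0 ≤ ((heap.set pos (heap.getD c 0)).set c item).getD j 0) ∧
    ((heap.set pos (heap.getD c 0)).set c item).Perm (heap.set pos item) := by
  have hcpos : pos < c := by omega
  have hcne : c ≠ pos := by omega
  set A := heap.set pos item with hA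
  have hApos : A.getD pos 0 = item := getD_set_eq _ _ _ hp
  have hAc : A.getD c 0 = heap.getD c 0 := getD_set_ne _ _ _ _ hcne
  set A' := (heap.set pos (heap.getD c 0)).set c item with hA'
  have hA'c : A'.getD c 0 = item := getD_set_eq _ _ _ (by simpa using hclt)
  have hA'pos : A'.getD pos 0 = A.getD c 0 := by
    rw [hA', getD_set_ne _ _ _ _ (Ne.symm hcne), getD_set_eq _ _ _ hp, hAc]
  have hA'k : ∀ k, k ≠ pos → k ≠ c → A'.getD k 0 = A.getD k 0 := by
    intro k hk1 hk2
    rw [hA', getD_set_ne _ _ _ _ hk2, getD_set_ne _ _ _ _ hk1, hA, getD_set_ne _ _ _ _ hk1]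
  refine ⟨by simpa using hclt, ?_, ?_, ?_⟩
  · intro i j hj hcij hic hjc
    simp only [List.length_set] at hj
    rcases eq_or_ne j pos with heq | hjpos
    · have hi : i = (pos - 1) / 2 := by omega
      have hipos : i ≠ pos := by omega
      have hic' : i ≠ c := by omega
      rw [heq, hA'pos, hA'k i hipos hic', hi]
      exact h2 c hclt hcc (by omega)
    · rw [hA'k j hjpos hjc]
      rcases eq_or_ne i pos with heq | hipos
      · rw [heq, hA'pos]
        exact hmin j hj (by omega)
      · rw [hA'k i hipos hic]
        exact h1 i j hj hcij hipos hjpos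
  · intro j hj hcj hc0
    simp only [List.length_set] at hj
    have hgp : (c - 1) / 2 = pos := by omega
    have hjpos : j ≠ pos := by omega
    have hjc : j ≠ c := by omega
    rw [hgp, hA'pos, hA'k j hjpos hjc]
    exact h1 c j hj hcj hcne hjpos
  · have e : (A.set pos (A.getD c 0)).set c (A.getD pos 0) = A' := by
      rw [hApos, hAc, hA', hA, List.set_set]
    rw [← e]
    exact set_swap_perm A pos c (by simp [hA, hp]) (by simp [hA, hclt])

theorem siftup_spec (heap : List Int) (pos : Nat) (item : Int) (hp : pos < heap.length)
    (h1 : ∀ i j, j < heap.length → (j = 2 * i + 1 ∨ j = 2 * i + 2) → i ≠ pos → j ≠ pos →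
      (heap.set pos item).getD i 0 ≤ (heap.set pos item).getD j 0)
    (h2 : ∀ j, j < heap.length → (j = 2 * pos + 1 ∨ j = 2 * pos + 2) → 0 < pos →
      (heap.set pos item).getD ((pos - 1) / 2) 0 ≤ (heap.set pos item).getD j 0) :
    IsHeap (pvSiftup heap pos item) ∧ (pvSiftup heap pos item).Perm (heap.set pos item) := by
  fun_induction pvSiftup heap pos item with
  | case1 heap pos hchild hcond ih =>
    have hmin : ∀ s, s < heap.length → (s = 2 * pos + 1 ∨ s = 2 * pos + 2) →
        (heap.set pos item).getD (2 * pos + 2) 0 ≤ (heap.set pos item).getD s 0 := by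
      intro s hs hss
      rcases hss with h | h
      · subst h
        rw [getD_set_ne _ _ _ _ (by omega : 2 * pos + 2 ≠ pos),
          getD_set_ne _ _ _ _ (by omega : 2 * pos + 1 ≠ pos)]
        omega
      · subst h; exact le_refl _
    obtain ⟨hq1, hq2, hq3, hq4⟩ :=
      siftup_rec heap pos (2 * pos + 2) item hp hcond.1 (by omega) hmin h1 h2
    obtain ⟨ihH, ihP⟩ := ih hq1 hq2 hq3
    exact ⟨ihH, ihP.trans hq4⟩
  | case2 heap pos hchild hcond ih =>
    have hmin : ∀ s, s < heap.length → (s = 2 * pos + 1 ∨ s = 2 * pos + 2) →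
        (heap.set pos item).getD (2 * pos + 1) 0 ≤ (heap.set pos item).getD s 0 := by
      intro s hs hss
      rcases hss with h | h
      · subst h; exact le_refl _
      · subst h
        rw [getD_set_ne _ _ _ _ (by omega : 2 * pos + 2 ≠ pos),
          getD_set_ne _ _ _ _ (by omega : 2 * pos + 1 ≠ pos)]
        have := not_and.mp hcond hs
        omega
    obtain ⟨hq1, hq2, hq3, hq4⟩ :=
      siftup_rec heap pos (2 * pos + 1) item hp hchild (by omega) hmin h1 h2
    obtain ⟨ihH, ihP⟩ := ih hq1 hq2 hq3
    exact ⟨ihH, ihP.trans hq4⟩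
  | case3 heap pos hchild =>
    refine siftdown_spec heap pos item hp ?_ h2
    intro i j hj hcij hjpos
    rcases eq_or_ne i pos with heq | hipos
    · exfalso; subst heq; omega
    · exact h1 i j hj hcij hipos hjpos

theorem set_append_len (q : List Int) (a : Int) : (q ++ [a]).set q.length a = q ++ [a] := by
  induction q with
  | nil => rfl
  | cons x xs ih => simp [ih]

theorem getD_append_left (q : List Int) (a : Int) (k : Nat) (h : k < q.length) :
    (q ++ [a]).getD k 0 = q.getD k 0 := by
  simp [List.getD_eq_getElem?_getD, List.getElem?_append_left h]

theorem getD_dropLast (q : List Int) (k : Nat) (h : k < q.dropLast.length) :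
    q.dropLast.getD k 0 = q.getD k 0 := by
  simp only [List.length_dropLast] at h
  simp [List.getD_eq_getElem?_getD, h,
    List.getElem?_eq_getElem (show k < q.length by omega)]

theorem heappush_spec (q : List Int) (a : Int) (hq : IsHeap q) :
    IsHeap (pvHeappush q a) ∧ (pvHeappush q a).Perm (a :: q) := by
  have hp : q.length < (q ++ [a]).length := by simp
  have hset : (q ++ [a]).set q.length a = q ++ [a] := set_append_len q a
  obtain ⟨hH, hP⟩ := siftdown_spec (q ++ [a]) q.length a hp
    (by
      intro i j hj hc hne
      simp only [List.length_append, List.length_cons, List.length_nil] at hj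
      have hjq : j < q.length := by omega
      have hiq : i < q.length := by omega
      rw [hset, getD_append_left _ _ _ hjq, getD_append_left _ _ _ hiq]
      exact hq i j hjq hc)
    (by
      intro j hj hc _
      simp only [List.length_append, List.length_cons, List.length_nil] at hj
      omega)
  rw [hset] at hP
  exact ⟨hH, hP.trans (List.perm_append_singleton a q)⟩

theorem root_le_all (q : List Int) (hq : IsHeap q) : ∀ j, j < q.length → q.getD 0 0 ≤ q.getD j 0 := by
  intro j
  induction j using Nat.strong_induction_on with
  | _ j ih =>
    intro hj
    rcases Nat.eq_zero_or_pos j with rfl | hj0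
    · exact le_refl _
    · have hpar : (j - 1) / 2 < j := Nat.lt_of_le_of_lt (Nat.div_le_self _ _) (by omega)
      have hchild : j = 2 * ((j - 1) / 2) + 1 ∨ j = 2 * ((j - 1) / 2) + 2 := by omega
      exact le_trans (ih _ hpar (lt_trans hpar hj)) (hq _ j hj hchild)

theorem root_min (q : List Int) (hq : IsHeap q) : ∀ x ∈ q, q.getD 0 0 ≤ x := by
  intro x hx
  obtain ⟨k, hk, rfl⟩ := List.mem_iff_getElem.mp hx
  rw [← List.getD_eq_getElem q 0 hk]
  exact root_le_all q hq k hk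

theorem heappop_spec (q : List Int) (hq : IsHeap q) (hne : q ≠ []) :
    (pvHeappop q).1 = q.getD 0 0 ∧ IsHeap (pvHeappop q).2 ∧ q.Perm ((pvHeappop q).1 :: (pvHeappop q).2) := by
  match q with
  | [x] =>
    refine ⟨rfl, ?_, List.Perm.refl _⟩
    intro i j hj hc
    rw [show (pvHeappop [x]).2 = [] from rfl] at hj
    simp at hj
  | x :: y :: ys =>
    set lastelt := (x :: y :: ys).getLast (by simp) with hlast
    set rs := (y :: ys).dropLast with hrs
    have hdrop : (x :: y :: ys).dropLast = x :: rs := rfl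
    have hpop : pvHeappop (x :: y :: ys) = (x, pvSiftup (lastelt :: rs) 0 lastelt) := by
      rfl
    have hAset : (lastelt :: rs).set 0 lastelt = lastelt :: rs := rfl
    have hrestlen : (x :: rs).length = (x :: y :: ys).length - 1 := by
      rw [← hdrop]; simp
    obtain ⟨hH, hP⟩ := siftup_spec (lastelt :: rs) 0 lastelt (by simp)
      (by
        intro i j hj hc hi0 hj0
        rw [hAset]
        simp only [List.length_cons] at hj
        have hrsl : rs.length = ys.length := by rw [hrs]; simp
        have hAq : ∀ k, k ≠ 0 → k < rs.length + 1 → (lastelt :: rs).getD k 0 = (x :: y :: ys).getD k 0 := by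
          intro k hk0 hk
          obtain ⟨k', rfl⟩ : ∃ k', k = k' + 1 := ⟨k - 1, by omega⟩
          rw [List.getD_cons_succ, ← List.getD_cons_succ (x := x), ← hdrop,
            getD_dropLast]
          rw [hdrop]; simpa using hk
        rw [hAq i hi0 (by omega), hAq j hj0 (by omega)]
        exact hq i j (by simp; omega) hc)
      (by intro j hj hc h0; omega)
    rw [hpop]
    rw [hAset] at hP
    refine ⟨rfl, hH, ?_⟩
    have hq1 : (x :: y :: ys) = (x :: rs) ++ [lastelt] := by
      rw [← hdrop, hlast]
      exact (List.dropLast_append_getLast _).symm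
    rw [hq1]
    exact (List.perm_append_singleton _ _).trans
      ((List.Perm.swap _ _ _).trans (hP.symm.cons _))

theorem build_heap (l : List Int) : ∀ acc : List Int, IsHeap acc →
    IsHeap (l.foldl (fun q a => pvHeappush q a) acc) ∧
      (l.foldl (fun q a => pvHeappush q a) acc).Perm (acc ++ l) := by
  induction l with
  | nil => intro acc hacc; exact ⟨hacc, by simp⟩
  | cons a l ih =>
    intro acc hacc
    obtain ⟨hH, hP⟩ := heappush_spec acc a hacc
    obtain ⟨ihH, ihP⟩ := ih (pvHeappush acc a) hH
    refine ⟨ihH, ihP.trans ?_⟩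
    exact (hP.append_right l).trans List.perm_middle.symm

-- ===== the two-queue side =====

-- invariant tying B's pair of queues to A's heap: both queues sorted, same multiset as the
-- heap, every element below a pending total s is at least s/2, and a negative pending total
-- has at most two copies in play
def InvOS (O S q : List Int) : Prop :=
  O.Pairwise (· ≤ ·) ∧ S.Pairwise (· ≤ ·) ∧ (O ++ S).Perm q ∧
  (∀ s ∈ S, ∀ w ∈ O ++ S, w < s → 2 * w ≥ s) ∧
  (∀ s ∈ S, s < 0 → (O ++ S).count s ≤ 2)

theorem head_le_sorted (c : Int) (cs : List Int) (h : (c :: cs).Pairwise (· ≤ ·)) :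
    ∀ w ∈ c :: cs, c ≤ w := by
  intro w hw
  rcases List.mem_cons.mp hw with rfl | hmem
  · exact le_refl _
  · exact (List.pairwise_cons.mp h).1 w hmem

theorem popMin_spec (O S : List Int) (hO : O.Pairwise (· ≤ ·)) (hS : S.Pairwise (· ≤ ·))
    (hne : O ++ S ≠ []) :
    ((pvPopMin O S).1 :: ((pvPopMin O S).2.1 ++ (pvPopMin O S).2.2)).Perm (O ++ S) ∧
    (∀ w ∈ O ++ S, (pvPopMin O S).1 ≤ w) ∧
    (pvPopMin O S).2.1.Sublist O ∧ (pvPopMin O S).2.2.Sublist S := by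
  match S, O with
  | [], [] => simp at hne
  | [], o :: os =>
    refine ⟨by simp [pvPopMin], ?_, by simp [pvPopMin], by simp [pvPopMin]⟩
    intro w hw
    simp only [List.append_nil] at hw
    exact head_le_sorted o os hO w hw
  | s :: ss, [] =>
    refine ⟨by simp [pvPopMin], ?_, by simp [pvPopMin], by simp [pvPopMin]⟩
    intro w hw
    simp only [List.nil_append] at hw
    exact head_le_sorted s ss hS w hw
  | s :: ss, o :: os =>
    by_cases h : s ≤ o
    · have he : pvPopMin (o :: os) (s :: ss) = (s, (o :: os, ss)) := by
        simp [pvPopMin, h]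
      rw [he]
      refine ⟨List.perm_middle.symm, ?_, List.Sublist.refl _, by simp⟩
      intro w hw
      rcases List.mem_append.mp hw with hw1 | hw2
      · exact le_trans h (head_le_sorted o os hO w hw1)
      · exact head_le_sorted s ss hS w hw2
    · have he : pvPopMin (o :: os) (s :: ss) = (o, (os, s :: ss)) := by
        simp [pvPopMin, h]
      rw [he]
      refine ⟨by simp, ?_, by simp, List.Sublist.refl _⟩
      intro w hw
      rcases List.mem_append.mp hw with hw1 | hw2
      · exact head_le_sorted o os hO w hw1
      · exact le_trans (le_of_lt (by omega)) (head_le_sorted s ss hS w hw2)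

theorem getD_zero_mem (q : List Int) (h : q ≠ []) : q.getD 0 0 ∈ q := by
  cases q with
  | nil => exact absurd rfl h
  | cons x xs => simp [List.getD]

theorem min_unique {x y : Int} {l m : List Int} (hp : l.Perm m) (hx : x ∈ l) (hy : y ∈ m)
    (h1 : ∀ w ∈ l, x ≤ w) (h2 : ∀ w ∈ m, y ≤ w) : x = y :=
  le_antisymm (h1 y (hp.mem_iff.mpr hy)) (h2 x (hp.mem_iff.mp hx))

theorem step_spec (O S q : List Int) (hH : IsHeap q) (hInv : InvOS O S q)
    (hlen : 2 ≤ (O ++ S).length) :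
    IsHeap (pvHeappush (pvHeappush (pvHeappop (pvHeappop q).2).2 (0 + (pvHeappop q).1 + (pvHeappop (pvHeappop q).2).1)) (0 + (pvHeappop q).1 + (pvHeappop (pvHeappop q).2).1)) ∧
    InvOS (pvPopMin (pvPopMin O S).2.1 (pvPopMin O S).2.2).2.1
      ((pvPopMin (pvPopMin O S).2.1 (pvPopMin O S).2.2).2.2 ++
        [0 + (pvPopMin O S).1 + (pvPopMin (pvPopMin O S).2.1 (pvPopMin O S).2.2).1,
         0 + (pvPopMin O S).1 + (pvPopMin (pvPopMin O S).2.1 (pvPopMin O S).2.2).1])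
      (pvHeappush (pvHeappush (pvHeappop (pvHeappop q).2).2 (0 + (pvHeappop q).1 + (pvHeappop (pvHeappop q).2).1)) (0 + (pvHeappop q).1 + (pvHeappop (pvHeappop q).2).1)) ∧
    ((pvPopMin (pvPopMin O S).2.1 (pvPopMin O S).2.2).2.1 ++
      ((pvPopMin (pvPopMin O S).2.1 (pvPopMin O S).2.2).2.2 ++
        [0 + (pvPopMin O S).1 + (pvPopMin (pvPopMin O S).2.1 (pvPopMin O S).2.2).1,
         0 + (pvPopMin O S).1 + (pvPopMin (pvPopMin O S).2.1 (pvPopMin O S).2.2).1])).length = (O ++ S).length := by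
  obtain ⟨hO, hS, hperm, hW, hX⟩ := hInv
  have hMne : O ++ S ≠ [] := by
    intro h; rw [h] at hlen; simp at hlen
  obtain ⟨hperm1, hmin1, hsubO1, hsubS1⟩ := popMin_spec O S hO hS hMne
  set x1 := (pvPopMin O S).1 with hx1def
  set O1 := (pvPopMin O S).2.1 with hO1def
  set S1 := (pvPopMin O S).2.2 with hS1def
  have hO1p : O1.Pairwise (· ≤ ·) := List.Pairwise.sublist hsubO1 hO
  have hS1p : S1.Pairwise (· ≤ ·) := List.Pairwise.sublist hsubS1 hS
  have hlen1 : 1 ≤ (O1 ++ S1).length := by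
    have := hperm1.length_eq
    simp only [List.length_cons] at this
    omega
  have hM1ne : O1 ++ S1 ≠ [] := by
    intro h; rw [h] at hlen1; simp at hlen1
  obtain ⟨hperm2, hmin2, hsubO2, hsubS2⟩ := popMin_spec O1 S1 hO1p hS1p hM1ne
  set x2 := (pvPopMin O1 S1).1 with hx2def
  set O2 := (pvPopMin O1 S1).2.1 with hO2def
  set S2 := (pvPopMin O1 S1).2.2 with hS2def
  have hO2p : O2.Pairwise (· ≤ ·) := List.Pairwise.sublist hsubO2 hO1p
  have hS2p : S2.Pairwise (· ≤ ·) := List.Pairwise.sublist hsubS2 hS1p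
  have hmemM1 : ∀ w ∈ O1 ++ S1, w ∈ O ++ S := fun w hw =>
    hperm1.subset (List.mem_cons_of_mem _ hw)
  have hx1M : x1 ∈ O ++ S := hperm1.subset (by simp)
  have hmemM2 : ∀ w ∈ O2 ++ S2, w ∈ O1 ++ S1 := fun w hw =>
    hperm2.subset (List.mem_cons_of_mem _ hw)
  have hx2M1 : x2 ∈ O1 ++ S1 := hperm2.subset (by simp)
  have hx2M : x2 ∈ O ++ S := hmemM1 _ hx2M1
  have hx1x2 : x1 ≤ x2 := hmin1 x2 hx2M
  have hx2le : ∀ w ∈ O2 ++ S2, x2 ≤ w := fun w hw => hmin2 w (hmemM2 w hw)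
  set t := 0 + x1 + x2 with htdef
  have hMM : (x1 :: x2 :: (O2 ++ S2)).Perm (O ++ S) := (hperm2.cons x1).trans hperm1
  have hcnt : ∀ a : Int, (O ++ S).count a = (O2 ++ S2).count a
      + (if x2 = a then 1 else 0) + (if x1 = a then 1 else 0) := by
    intro a
    rw [← hMM.count_eq a]
    simp [List.count_cons]
  have hsS2S : ∀ s ∈ S2, s ∈ S := fun s hs => (hsubS2.trans hsubS1).subset hs
  -- every surviving pending total is at most the new total t
  have hS2t : ∀ s ∈ S2, s ≤ t := by
    intro s hs
    by_contra hgt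
    push Not at hgt
    have hsS : s ∈ S := hsS2S s hs
    have hsM2 : s ∈ O2 ++ S2 := List.mem_append.mpr (Or.inr hs)
    have hx2s : x2 ≤ s := hx2le s hsM2
    rcases lt_or_eq_of_le hx2s with h2lt | h2eq
    · have h1lt : x1 < s := lt_of_le_of_lt hx1x2 h2lt
      have w1 := hW s hsS x1 hx1M h1lt
      have w2 := hW s hsS x2 hx2M h2lt
      omega
    · rcases lt_or_eq_of_le (le_trans hx1x2 hx2s) with h1lt | h1eq
      · have w1 := hW s hsS x1 hx1M h1lt
        omega
      · have hsneg : s < 0 := by omega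
        have hxc := hX s hsS hsneg
        have hm2 : 0 < (O2 ++ S2).count s := List.count_pos_iff.mpr hsM2
        have hc := hcnt s
        rw [if_pos h2eq, if_pos h1eq] at hc
        omega
  have hS'p : (S2 ++ [t, t]).Pairwise (· ≤ ·) := by
    rw [List.pairwise_append]
    refine ⟨hS2p, by simp, ?_⟩
    intro a ha b hb
    have hat := hS2t a ha
    simp only [List.mem_cons, List.not_mem_nil, or_false] at hb
    rcases hb with rfl | rfl <;> exact hat
  -- heap side: the two popped roots are the same two minima
  have hqne : q ≠ [] := by
    intro h
    have := hperm.length_eq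
    rw [h] at this
    simp only [List.length_nil] at this
    omega
  obtain ⟨hv1, hH1, hqperm1⟩ := heappop_spec q hH hqne
  have hv1min : ∀ w ∈ q, (pvHeappop q).1 ≤ w := by
    intro w hw; rw [hv1]; exact root_min q hH w hw
  have hv1mem : (pvHeappop q).1 ∈ q := by rw [hv1]; exact getD_zero_mem q hqne
  have hx1v1 : x1 = (pvHeappop q).1 := min_unique hperm hx1M hv1mem hmin1 hv1min
  have hM1q1 : (O1 ++ S1).Perm (pvHeappop q).2 := by
    have h3 : ((pvHeappop q).1 :: (O1 ++ S1)).Perm ((pvHeappop q).1 :: (pvHeappop q).2) := by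
      rw [← hx1v1]
      exact hperm1.trans (hperm.trans (hx1v1 ▸ hqperm1))
    exact h3.cons_inv
  have hq1ne : (pvHeappop q).2 ≠ [] := by
    intro h
    have := hM1q1.length_eq
    rw [h] at this
    simp only [List.length_nil] at this
    omega
  obtain ⟨hv2, hH2, hqperm2⟩ := heappop_spec _ hH1 hq1ne
  have hv2min : ∀ w ∈ (pvHeappop q).2, (pvHeappop (pvHeappop q).2).1 ≤ w := by
    intro w hw; rw [hv2]; exact root_min _ hH1 w hw
  have hv2mem : (pvHeappop (pvHeappop q).2).1 ∈ (pvHeappop q).2 := by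
    rw [hv2]; exact getD_zero_mem _ hq1ne
  have hx2v2 : x2 = (pvHeappop (pvHeappop q).2).1 := min_unique hM1q1 hx2M1 hv2mem hmin2 hv2min
  have hM2q2 : (O2 ++ S2).Perm (pvHeappop (pvHeappop q).2).2 := by
    have h3 : ((pvHeappop (pvHeappop q).2).1 :: (O2 ++ S2)).Perm
        ((pvHeappop (pvHeappop q).2).1 :: (pvHeappop (pvHeappop q).2).2) := by
      rw [← hx2v2]
      exact hperm2.trans (hM1q1.trans (hx2v2 ▸ hqperm2))
    exact h3.cons_inv
  have htv : 0 + (pvHeappop q).1 + (pvHeappop (pvHeappop q).2).1 = t := by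
    rw [htdef, hx1v1, hx2v2]
  obtain ⟨hH3, hP3⟩ := heappush_spec _ (0 + (pvHeappop q).1 + (pvHeappop (pvHeappop q).2).1) hH2
  obtain ⟨hH4, hP4⟩ := heappush_spec _ (0 + (pvHeappop q).1 + (pvHeappop (pvHeappop q).2).1) hH3
  refine ⟨hH4, ⟨hO2p, hS'p, ?_, ?_, ?_⟩, ?_⟩
  · -- multiset equality with the new heap
    have hq' : (pvHeappush (pvHeappush (pvHeappop (pvHeappop q).2).2
          (0 + (pvHeappop q).1 + (pvHeappop (pvHeappop q).2).1))
          (0 + (pvHeappop q).1 + (pvHeappop (pvHeappop q).2).1)).Perm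
        (t :: t :: (O2 ++ S2)) := by
      rw [← htv]
      exact hP4.trans ((hP3.cons _).trans (((hM2q2.symm.cons _).cons _)))
    refine List.Perm.trans ?_ hq'.symm
    have e : O2 ++ (S2 ++ [t, t]) = (O2 ++ S2) ++ [t, t] := by
      rw [List.append_assoc]
    rw [e]
    exact (List.perm_append_comm).trans (by simp [List.perm_append_comm])
  · -- the halving bound on elements below a pending total
    intro s hs w hw hlt
    have hwcases : w ∈ O2 ++ S2 ∨ w = t := by
      rcases List.mem_append.mp hw with h | h
      · exact Or.inl (List.mem_append.mpr (Or.inl h))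
      · rcases List.mem_append.mp h with h' | h'
        · exact Or.inl (List.mem_append.mpr (Or.inr h'))
        · simp only [List.mem_cons, List.not_mem_nil, or_false] at h'
          rcases h' with rfl | rfl <;> exact Or.inr rfl
    rcases List.mem_append.mp hs with hsS2 | hst
    · rcases hwcases with hwM2 | rfl
      · exact hW s (hsS2S s hsS2) w (hmemM1 _ (hmemM2 _ hwM2)) hlt
      · have := hS2t s hsS2
        omega
    · simp only [List.mem_cons, List.not_mem_nil, or_false] at hst
      have hst' : s = t := by rcases hst with rfl | rfl <;> rfl
      subst hst'
      rcases hwcases with hwM2 | rfl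
      · have := hx2le w hwM2
        omega
      · omega
  · -- a negative pending total has at most two copies
    intro s hs hneg
    have htnotM2 : t < 0 → t ∉ O2 ++ S2 := by
      intro ht0 hmem
      have := hx2le t hmem
      omega
    have hc2 : ([t, t] : List Int).count s = if s = t then 2 else 0 := by
      by_cases h : s = t
      · subst h; simp
      · have h' : ¬ t = s := fun he => h he.symm
        simp [h, h']
    have hcount_split : (O2 ++ (S2 ++ [t, t])).count s
        = (O2 ++ S2).count s + (if s = t then 2 else 0) := by
      simp only [List.count_append, hc2]
      split_ifs <;> omega
    rcases List.mem_append.mp hs with hsS2 | hst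
    · have hsS : s ∈ S := hsS2S s hsS2
      have htns : t ≠ s := by
        intro he
        have hsM2 : s ∈ O2 ++ S2 := List.mem_append.mpr (Or.inr hsS2)
        have hx2s : x2 ≤ s := hx2le s hsM2
        rcases lt_or_eq_of_le hx2s with h2lt | h2eq
        · have w2 := hW s hsS x2 hx2M h2lt
          omega
        · omega
      rw [hcount_split, if_neg (fun he => htns he.symm)]
      have hc := hcnt s
      have := hX s hsS hneg
      split_ifs at hc <;> omega
    · simp only [List.mem_cons, List.not_mem_nil, or_false] at hst
      have hst' : s = t := by rcases hst with rfl | rfl <;> rfl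
      subst hst'
      rw [hcount_split, if_pos rfl]
      have : t ∉ O2 ++ S2 := htnotM2 hneg
      rw [List.count_eq_zero.mpr this]
  · -- length is preserved
    have := hMM.length_eq
    simp only [List.length_cons, List.length_append, List.length_nil] at this ⊢
    omega

theorem fold_inv (r : List Int) : ∀ O S q : List Int, IsHeap q → InvOS O S q →
    2 ≤ (O ++ S).length →
    InvOS (r.foldl (fun os (_ : Int) =>
        let p1 := pvPopMin os.1 os.2
        let p2 := pvPopMin p1.2.1 p1.2.2
        let total := 0 + p1.1 + p2.1
        (p2.2.1, p2.2.2 ++ [total, total])) (O, S)).1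
      (r.foldl (fun os (_ : Int) =>
        let p1 := pvPopMin os.1 os.2
        let p2 := pvPopMin p1.2.1 p1.2.2
        let total := 0 + p1.1 + p2.1
        (p2.2.1, p2.2.2 ++ [total, total])) (O, S)).2
      (r.foldl (fun q (_ : Int) =>
        let p1 := pvHeappop q
        let p2 := pvHeappop p1.2
        let total := 0 + p1.1 + p2.1
        pvHeappush (pvHeappush p2.2 total) total) q) := by
  induction r with
  | nil => intro O S q _ hInv _; exact hInv
  | cons x r ih =>
    intro O S q hH hInv hlen
    obtain ⟨hH', hInv', hlen'⟩ := step_spec O S q hH hInv hlen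
    simp only [List.foldl_cons]
    exact ih _ _ _ hH' hInv' (by rw [hlen']; exact hlen)

theorem pyRange_nil (n : Int) (h : n ≤ 0) : PySem.List.pyRange 0 n 1 = [] := by
  simp [PySem.List.pyRange, show ¬((0:Int) < n) by omega]

theorem main_thm (ability : List Int) (number : Int) (hpre : Pre_solution ability number) :
    solution ability number = solution_alt ability number := by
  unfold solution solution_alt
  obtain ⟨hH0, hP0⟩ := build_heap ability [] (by intro i j hj hc; simp at hj)
  have hP0' : (ability.foldl (fun q a => pvHeappush q a) []).Perm ability := by simpa using hP0
  have hs0p : (PySem.List.sorted ability (fun x => x) false).Perm ability :=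
    PySem.List.sorted_perm ability _ false
  have hs0pw : (PySem.List.sorted ability (fun x => x) false).Pairwise (· ≤ ·) :=
    PySem.List.sorted_pairwise ability (fun x => x)
  have hInv0 : InvOS (PySem.List.sorted ability (fun x => x) false) []
      (ability.foldl (fun q a => pvHeappush q a) []) := by
    refine ⟨hs0pw, by simp, by simpa using hs0p.trans hP0'.symm, by simp, by simp⟩
  by_cases hn : 1 ≤ number
  · have hlen : 2 ≤ ((PySem.List.sorted ability (fun x => x) false) ++ ([] : List Int)).length := by
      have := hs0p.length_eq
      have := hpre hn
      simp only [List.append_nil]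
      omega
    have h := fold_inv (PySem.List.pyRange 0 number 1) _ _ _ hH0 hInv0 hlen
    obtain ⟨_, _, hperm, _, _⟩ := h
    have := hperm.sum_eq
    simp only [List.sum_append] at this
    simpa using this.symm
  · rw [pyRange_nil number (by omega)]
    simp only [List.foldl_nil]
    have := (hs0p.trans hP0'.symm).sum_eq
    simpa using this.symm

-- ===== VERDICT (by name: the statement is the Claim_ definition above) =====
theorem solution_spec : Claim_equal_solution := by
  intro ability number _ hpre
  unfold Spec_solution
  exact main_thm ability number hpre
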